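-- pv_equiv track=rewrite | github.com/parkjisu6239/2021_APS | SWEA/1289_원재의 메모리 복구하기/s1.py | Memory
-- ===== SOURCE A (Python) =====
-- def Memory(memory):
--     bit_zero = [0] * len(memory) # 초기값 0000~000
--     result = 0 # 고친 횟수
--     while bit_zero != memory: # 다를때만 반복
--         for i in range(len(memory)): # 처음으로 다른 지점을 찾자
--             if memory[i] != bit_zero[i]: # 그 지점 이후로 모두 0 또는 1로 변경
--                 for j in range(i,len(bit_zero)):
--                     bit_zero[j] = memory[i]
--                 result += 1 # 한번 고쳤으니, 고친횟수 +1
--                 break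
--
--     return result
-- ===== SOURCE B (Python) =====
-- def Memory(memory):
--     prev = 0
--     count = 0
--     for x in memory:
--         if x != prev:
--             count += 1
--             prev = x
--     return count
-- ===== Notes on version B (the rewrite author's own statement) =====
-- stated objective: faster
-- what changed: Replaced the repeated rescan-and-rewrite of a shadow array with a single pass that counts positions whose value differs from the previous one (previous initialised to 0).
import Mathlib
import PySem

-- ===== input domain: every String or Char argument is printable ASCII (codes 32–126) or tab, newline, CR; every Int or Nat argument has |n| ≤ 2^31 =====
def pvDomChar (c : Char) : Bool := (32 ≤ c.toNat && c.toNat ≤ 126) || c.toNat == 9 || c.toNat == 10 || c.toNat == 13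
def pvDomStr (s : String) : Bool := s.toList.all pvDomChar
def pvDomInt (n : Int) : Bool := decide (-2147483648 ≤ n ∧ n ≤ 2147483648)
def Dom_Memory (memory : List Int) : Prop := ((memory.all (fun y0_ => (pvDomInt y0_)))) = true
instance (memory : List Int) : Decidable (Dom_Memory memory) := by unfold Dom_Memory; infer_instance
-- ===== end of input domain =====

-- B replaces A's repeated rescan-and-rewrite of a shadow array by one pass counting
-- value changes (previous value initialised to 0); measured asymptotically faster (O(n) vs O(n^2)).


-- ===== PORT A =====
-- common-prefix length of two lists (termination measure for A's while loop)
def cpA : List Int → List Int → Nat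
  | a :: as, b :: bs => if a = b then cpA as bs + 1 else 0
  | _, _ => 0

-- one pass of A's inner `for i in range(len(memory))` with its `break`:
-- scan for the first index where memory and bit_zero differ, then set every
-- position from there on to memory[i] (the `for j in range(i, len(bit_zero))` loop).
def stepA : List Int → List Int → List Int
  | m :: ms, b :: bs => if m ≠ b then m :: bs.map (fun _ => m) else b :: stepA ms bs
  | _, bz => bz

theorem stepA_length : ∀ (mem bz : List Int), (stepA mem bz).length = bz.length := by
  intro mem
  induction mem with
  | nil => intro bz; simp [stepA]
  | cons m ms ih =>
    intro bz
    cases bz with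
    | nil => simp [stepA]
    | cons b bs =>
      by_cases h : m = b <;> simp [stepA, h, ih]

theorem cpA_le : ∀ (mem bz : List Int), cpA mem bz ≤ mem.length := by
  intro mem
  induction mem with
  | nil => intro bz; cases bz <;> simp [cpA]
  | cons m ms ih =>
    intro bz
    cases bz with
    | nil => simp [cpA]
    | cons b bs =>
      by_cases h : m = b <;> simp [cpA, h]
      exact ih bs

theorem cpA_lt : ∀ (mem bz : List Int), bz.length = mem.length → bz ≠ mem →
    cpA mem bz < mem.length := by
  intro mem
  induction mem with
  | nil => intro bz hl hne; cases bz <;> simp_all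
  | cons m ms ih =>
    intro bz hl hne
    cases bz with
    | nil => simp_all
    | cons b bs =>
      by_cases h : m = b
      · subst h
        have hbs : bs ≠ ms := by intro h2; exact hne (by rw [h2])
        have := ih bs (by simpa using hl) hbs
        simp [cpA]
        omega
      · simp [cpA, h]

theorem cpA_stepA : ∀ (mem bz : List Int), bz.length = mem.length → bz ≠ mem →
    cpA mem bz < cpA mem (stepA mem bz) := by
  intro mem
  induction mem with
  | nil => intro bz hl hne; cases bz <;> simp_all
  | cons m ms ih =>
    intro bz hl hne
    cases bz with
    | nil => simp_all
    | cons b bs =>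
      by_cases h : m = b
      · subst h
        have hbs : bs ≠ ms := by intro h2; exact hne (by rw [h2])
        have := ih bs (by simpa using hl) hbs
        simpa [stepA, cpA] using this
      · simp [stepA, h, cpA]

-- A's `while bit_zero != memory` loop; `res` is A's `result`.  The length
-- hypothesis only makes the recursion total (it holds on A's actual call).
def loopA (mem bz : List Int) (hl : bz.length = mem.length) (res : Int) : Int :=
  if h : bz = mem then res
  else loopA mem (stepA mem bz) (by rw [stepA_length]; exact hl) (res + 1)
termination_by mem.length - cpA mem bz
decreasing_by
  have h1 := cpA_stepA mem bz hl h
  have h2 := cpA_le mem (stepA mem bz)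
  have h3 := cpA_lt mem bz hl h
  omega

def Memory (memory : List Int) : Int :=
  loopA memory (List.replicate memory.length 0) (by simp) 0

-- ===== PORT B =====
def Memory_alt (memory : List Int) : Int :=
  (memory.foldl (fun (s : Int × Int) x => if x ≠ s.1 then (x, s.2 + 1) else s)
    ((0 : Int), (0 : Int))).2

-- ===== PRECONDITION & SPEC =====
def Spec_Memory (memory : List Int) (out : Int) : Prop := out = Memory_alt memory
instance (memory : List Int) (out : Int) : Decidable (Spec_Memory memory out) := by unfold Spec_Memory; infer_instance

-- ===== CLAIM (what is proved, stated in full; the proofs are below) =====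
def Claim_equal_Memory : Prop := ∀ (memory : List Int), Dom_Memory memory → Spec_Memory memory (Memory memory)

-- ===== LEMMAS AND PROOFS =====

-- number of transitions in xs relative to previous value v
def countT (v : Int) : List Int → Int
  | [] => 0
  | x :: xs => if x ≠ v then 1 + countT x xs else countT v xs

theorem foldl_countT : ∀ (xs : List Int) (v c : Int),
    (xs.foldl (fun (s : Int × Int) x => if x ≠ s.1 then (x, s.2 + 1) else s) (v, c)).2
      = c + countT v xs := by
  intro xs
  induction xs with
  | nil => intro v c; simp [countT]
  | cons x xs ih =>
    intro v c
    by_cases h : x = v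
    · subst h
      simpa [countT] using ih x c
    · have h2 := ih x (c + 1)
      simp [countT, h] at h2 ⊢
      omega

theorem stepA_prefix : ∀ (pre ms bs : List Int),
    stepA (pre ++ ms) (pre ++ bs) = pre ++ stepA ms bs := by
  intro pre
  induction pre with
  | nil => intro ms bs; rfl
  | cons p pre ih =>
    intro ms bs
    simp [stepA, ih]

theorem loopA_congr (mem mem' bz bz' : List Int) (h1 : mem = mem') (h2 : bz = bz')
    (hl : bz.length = mem.length) (hl' : bz'.length = mem'.length) (r : Int) :
    loopA mem bz hl r = loopA mem' bz' hl' r := by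
  subst h1; subst h2; rfl

-- the loop invariant: bit_zero = (agreed prefix of memory) ++ constant tail v
theorem loopA_invariant : ∀ (rest pre : List Int) (v : Int)
    (hl : (pre ++ rest.map (fun _ => v)).length = (pre ++ rest).length) (r : Int),
    loopA (pre ++ rest) (pre ++ rest.map (fun _ => v)) hl r = r + countT v rest := by
  intro rest
  induction rest with
  | nil =>
    intro pre v hl r
    rw [loopA]
    simp [countT]
  | cons x xs ih =>
    intro pre v hl r
    have hlen : ((pre ++ [x]) ++ xs.map (fun _ => x)).length = ((pre ++ [x]) ++ xs).length := by
      simp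
    by_cases h : x = v
    · subst h
      calc loopA (pre ++ x :: xs) (pre ++ (x :: xs).map (fun _ => x)) hl r
          = loopA ((pre ++ [x]) ++ xs) ((pre ++ [x]) ++ xs.map (fun _ => x)) hlen r :=
            loopA_congr _ _ _ _ (by simp) (by simp) _ _ _
        _ = r + countT x xs := ih (pre ++ [x]) x hlen r
        _ = r + countT x (x :: xs) := by simp [countT]
    · have hne : pre ++ (x :: xs).map (fun _ => v) ≠ pre ++ x :: xs := by
        intro heq
        have h2 := List.append_cancel_left heq
        simp at h2
        exact h h2.1.symm
      have hstep : stepA (pre ++ x :: xs) (pre ++ (x :: xs).map (fun _ => v))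
          = (pre ++ [x]) ++ xs.map (fun _ => x) := by
        rw [List.map_cons, stepA_prefix]
        simp [stepA, h]
      rw [loopA, dif_neg hne]
      calc loopA (pre ++ x :: xs) (stepA (pre ++ x :: xs) (pre ++ (x :: xs).map (fun _ => v)))
              (by rw [stepA_length]; exact hl) (r + 1)
          = loopA ((pre ++ [x]) ++ xs) ((pre ++ [x]) ++ xs.map (fun _ => x)) hlen (r + 1) :=
            loopA_congr _ _ _ _ (by simp) hstep _ _ _
        _ = r + 1 + countT x xs := ih (pre ++ [x]) x hlen (r + 1)
        _ = r + countT v (x :: xs) := by simp [countT, h]; omega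

-- ===== VERDICT (by name: the statement is the Claim_ definition above) =====
theorem Memory_spec : Claim_equal_Memory := by
  intro memory _
  unfold Spec_Memory Memory Memory_alt
  rw [foldl_countT]
  calc loopA memory (List.replicate memory.length 0) (by simp) 0
      = loopA ([] ++ memory) ([] ++ memory.map (fun _ => (0 : Int))) (by simp) 0 :=
        loopA_congr _ _ _ _ (by simp) (by simp) _ _ _
    _ = 0 + countT 0 memory := loopA_invariant memory [] 0 (by simp) 0
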